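-- pv_equiv track=rewrite | github.com/Earendil58/Python_Algoritmos | random_test.py | validar_direccion
-- ===== SOURCE A (Python) =====
-- def validar_direccion(direccion, tipo_de_control):
--     if tipo_de_control == 'Hard Control':
--         tiene_letras_y_digitos = False
--         no_mayusculas_consecutivas = True
--         palabra_digitos = False
--         anterior = ''
--         es_palabra = False
--         contiene_digitos = False
--         for letra in direccion:
--             if letra.isdigit():
--                 contiene_digitos = True
--                 es_palabra = True
--             elif letra.isalpha():
--                 tiene_letras_y_digitos = True
--                 es_palabra = True
--                 if anterior.isupper() and letra.isupper():
--                     no_mayusculas_consecutivas = False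
--             elif letra in ' -/#.':
--                 if es_palabra and contiene_digitos:
--                     palabra_digitos = True
--                 es_palabra = False
--                 contiene_digitos = False
--             anterior = letra
--         if tiene_letras_y_digitos and no_mayusculas_consecutivas and palabra_digitos:
--             return True
--         else:
--             return False
--     else:
--         return False
-- ===== SOURCE B (Python) =====
-- def validar_direccion(direccion, tipo_de_control):
--     if tipo_de_control != 'Hard Control':
--         return False
--     has_letter = any(c.isalpha() for c in direccion)
--     no_consec_upper = not any(p.isupper() and c.isupper()
--                               for p, c in zip(direccion, direccion[1:]))
--     # words terminated by a separator; the final unterminated segment is not a word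
--     words = []
--     cur = []
--     for c in direccion:
--         if c in ' -/#.':
--             words.append(cur)
--             cur = []
--         else:
--             cur.append(c)
--     word_with_digit = any(any(ch.isdigit() for ch in w) for w in words)
--     return has_letter and no_consec_upper and word_with_digit
-- ===== Notes on version B (the rewrite author's own statement) =====
-- stated objective: simpler
-- what changed: A's fused single-pass state machine over six mutable flags is replaced by three independent simple scans: any(isalpha), an adjacent-pair scan over zip(s, s[1:]) for consecutive uppercase, and a split into separator-terminated words (dropping the final unterminated segment) tested for a digit.
import Mathlib
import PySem

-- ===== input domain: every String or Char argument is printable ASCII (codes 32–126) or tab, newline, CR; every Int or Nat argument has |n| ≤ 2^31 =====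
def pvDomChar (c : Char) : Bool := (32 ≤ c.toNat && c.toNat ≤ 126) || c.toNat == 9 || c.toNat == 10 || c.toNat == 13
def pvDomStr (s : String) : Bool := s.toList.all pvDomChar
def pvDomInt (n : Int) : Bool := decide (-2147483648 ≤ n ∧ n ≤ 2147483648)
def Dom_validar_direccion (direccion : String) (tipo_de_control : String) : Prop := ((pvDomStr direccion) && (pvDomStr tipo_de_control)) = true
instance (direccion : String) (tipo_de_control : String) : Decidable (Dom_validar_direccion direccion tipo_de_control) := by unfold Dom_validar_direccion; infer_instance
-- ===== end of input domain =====

-- B replaces A's fused single-pass six-flag state machine by three independent simple scans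
-- (any letter; no adjacent uppercase pair; some separator-terminated word contains a digit); objective: simpler.

-- ===== PORT A =====
-- Python's `letra in ' -/#.'` is ported as isIn on the char list of that literal.
-- Loop body of A; state = (tiene_letras_y_digitos, no_mayusculas_consecutivas, palabra_digitos,
-- anterior, es_palabra, contiene_digitos). Python's `anterior` is '' then the one-char string of the
-- previous char: ported as Option Char, and `anterior.isupper()` as `anterior.elim false isupper`
-- (exact: ''.isupper() is False, and on a one-char string str.isupper equals the char test).
def vdStep (st : Bool × Bool × Bool × Option Char × Bool × Bool) (letra : Char) :
    Bool × Bool × Bool × Option Char × Bool × Bool :=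
  let (tiene, nomay, palabra, anterior, es, cont) := st
  if PySem.Chars.isdigit letra then
    (tiene, nomay, palabra, some letra, true, true)
  else if PySem.Chars.isalpha letra then
    (true, (if (anterior.elim false PySem.Chars.isupper) && PySem.Chars.isupper letra then false
            else nomay), palabra, some letra, true, cont)
  else if PySem.Chars.isIn [letra] [' ', '-', '/', '#', '.'] then
    (tiene, nomay, (if es && cont then true else palabra), some letra, false, false)
  else
    (tiene, nomay, palabra, some letra, es, cont)

def validar_direccion (direccion : String) (tipo_de_control : String) : Bool :=
  if tipo_de_control == "Hard Control" then
    let r := direccion.toList.foldl vdStep (false, true, false, none, false, false)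
    if r.1 && r.2.1 && r.2.2.1 then true else false
  else false

-- ===== PORT B =====
def validar_direccion_alt (direccion : String) (tipo_de_control : String) : Bool :=
  if tipo_de_control == "Hard Control" then
    let l := direccion.toList
    let hasLetter := l.any PySem.Chars.isalpha
    let noConsecUpper :=
      !((l.zip l.tail).any (fun pc => PySem.Chars.isupper pc.1 && PySem.Chars.isupper pc.2))
    let wordsCur := l.foldl
      (fun (st : List (List Char) × List Char) c =>
        if PySem.Chars.isIn [c] [' ', '-', '/', '#', '.'] then (st.1 ++ [st.2], [])
        else (st.1, st.2 ++ [c])) ([], [])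
    let wordWithDigit := wordsCur.1.any (fun w => w.any PySem.Chars.isdigit)
    hasLetter && noConsecUpper && wordWithDigit
  else false

-- ===== PRECONDITION & SPEC =====
def Spec_validar_direccion (direccion : String) (tipo_de_control : String) (out : Bool) : Prop := out = validar_direccion_alt direccion tipo_de_control
instance (direccion : String) (tipo_de_control : String) (out : Bool) : Decidable (Spec_validar_direccion direccion tipo_de_control out) := by unfold Spec_validar_direccion; infer_instance

-- ===== CLAIM (what is proved, stated in full; the proofs are below) =====
def Claim_equal_validar_direccion : Prop := ∀ (direccion : String) (tipo_de_control : String), Dom_validar_direccion direccion tipo_de_control → Spec_validar_direccion direccion tipo_de_control (validar_direccion direccion tipo_de_control)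

-- ===== LEMMAS AND PROOFS =====

-- character facts (PySem's predicates are ASCII range tests, so these hold for every Char)
theorem vd_digit_not_alpha (c : Char) (h : PySem.Chars.isdigit c = true) :
    PySem.Chars.isalpha c = false := by
  simp [PySem.Chars.isdigit, PySem.Chars.isalpha, PySem.Chars.isupper, PySem.Chars.islower,
        Char.le_def, UInt32.le_iff_toNat_le] at *
  omega

theorem vd_not_alpha_not_upper (c : Char) (h : PySem.Chars.isalpha c = false) :
    PySem.Chars.isupper c = false := by
  simp [PySem.Chars.isalpha] at h; exact h.1

theorem vd_sep_mem (c : Char) (h : PySem.Chars.isIn [c] [' ', '-', '/', '#', '.'] = true) :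
    c ∈ [' ', '-', '/', '#', '.'] := by
  have h2 := (PySem.Chars.isIn_iff_infix _ _).1 h
  simpa using h2.sublist.subset (List.mem_singleton_self c)

theorem vd_sep_not_digit (c : Char) (h : PySem.Chars.isIn [c] [' ', '-', '/', '#', '.'] = true) :
    PySem.Chars.isdigit c = false := by
  have hm := vd_sep_mem c h
  simp only [List.mem_cons, List.not_mem_nil, or_false] at hm
  rcases hm with rfl | rfl | rfl | rfl | rfl <;> decide

theorem vd_sep_not_alpha (c : Char) (h : PySem.Chars.isIn [c] [' ', '-', '/', '#', '.'] = true) :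
    PySem.Chars.isalpha c = false := by
  have hm := vd_sep_mem c h
  simp only [List.mem_cons, List.not_mem_nil, or_false] at hm
  rcases hm with rfl | rfl | rfl | rfl | rfl <;> decide

theorem vd_digit_not_sep (c : Char) (h : PySem.Chars.isdigit c = true) :
    PySem.Chars.isIn [c] [' ', '-', '/', '#', '.'] = false := by
  cases hs : PySem.Chars.isIn [c] [' ', '-', '/', '#', '.'] with
  | false => rfl
  | true => exact absurd h (by simp [vd_sep_not_digit c hs])

theorem vd_alpha_not_sep (c : Char) (h : PySem.Chars.isalpha c = true) :
    PySem.Chars.isIn [c] [' ', '-', '/', '#', '.'] = false := by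
  cases hs : PySem.Chars.isIn [c] [' ', '-', '/', '#', '.'] with
  | false => rfl
  | true => exact absurd h (by simp [vd_sep_not_alpha c hs])

-- the `no_mayusculas_consecutivas` flag, characterised as a pair scan carrying the previous char
def vdBad : Option Char → List Char → Bool
  | _, [] => false
  | a, c :: r => ((a.elim false PySem.Chars.isupper) && PySem.Chars.isupper c) || vdBad (some c) r

-- the `palabra_digitos` flag, exactly A's (es_palabra, contiene_digitos) recursion
def vdSegA (e cd : Bool) : List Char → Bool
  | [] => false
  | c :: r =>
    if PySem.Chars.isdigit c then vdSegA true true r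
    else if PySem.Chars.isalpha c then vdSegA true cd r
    else if PySem.Chars.isIn [c] [' ', '-', '/', '#', '.'] then (e && cd) || vdSegA false false r
    else vdSegA e cd r

-- the same flag with the single "current segment has a digit" bit
def vdSeg (cd : Bool) : List Char → Bool
  | [] => false
  | c :: r =>
    if PySem.Chars.isIn [c] [' ', '-', '/', '#', '.'] then cd || vdSeg false r
    else vdSeg (cd || PySem.Chars.isdigit c) r

theorem vd_fold_fst (l : List Char) (t n p : Bool) (a : Option Char) (e cd : Bool) :
    (l.foldl vdStep (t, n, p, a, e, cd)).1 = (t || l.any PySem.Chars.isalpha) := by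
  induction l generalizing t n p a e cd with
  | nil => simp
  | cons c r ih =>
    simp only [List.foldl_cons, List.any_cons, vdStep]
    by_cases hd : PySem.Chars.isdigit c = true
    · simp [hd, ih, vd_digit_not_alpha c hd]
    · simp only [Bool.not_eq_true] at hd
      by_cases ha : PySem.Chars.isalpha c = true
      · simp [hd, ha, ih]
      · simp only [Bool.not_eq_true] at ha
        by_cases hs : PySem.Chars.isIn [c] [' ', '-', '/', '#', '.'] = true
        · simp [hd, ha, hs, ih]
        · simp only [Bool.not_eq_true] at hs
          simp [hd, ha, hs, ih]

theorem vd_fold_nomay (l : List Char) (t n p : Bool) (a : Option Char) (e cd : Bool) :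
    (l.foldl vdStep (t, n, p, a, e, cd)).2.1 = (n && !(vdBad a l)) := by
  induction l generalizing t n p a e cd with
  | nil => simp [vdBad]
  | cons c r ih =>
    simp only [List.foldl_cons, vdStep, vdBad]
    by_cases hd : PySem.Chars.isdigit c = true
    · have hu : PySem.Chars.isupper c = false :=
        vd_not_alpha_not_upper c (vd_digit_not_alpha c hd)
      simp [hd, ih, hu]
    · simp only [Bool.not_eq_true] at hd
      by_cases ha : PySem.Chars.isalpha c = true
      · by_cases hb : ((a.elim false PySem.Chars.isupper) && PySem.Chars.isupper c) = true
        · simp [hd, ha, hb, ih]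
        · simp only [Bool.not_eq_true] at hb
          simp [hd, ha, hb, ih]
      · simp only [Bool.not_eq_true] at ha
        have hu : PySem.Chars.isupper c = false := vd_not_alpha_not_upper c ha
        by_cases hs : PySem.Chars.isIn [c] [' ', '-', '/', '#', '.'] = true
        · simp [hd, ha, hs, hu, ih]
        · simp only [Bool.not_eq_true] at hs
          simp [hd, ha, hs, hu, ih]

theorem vd_bad_some (l : List Char) (a : Char) :
    vdBad (some a) l
      = ((a :: l).zip l).any (fun pc => PySem.Chars.isupper pc.1 && PySem.Chars.isupper pc.2) := by
  induction l generalizing a with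
  | nil => simp [vdBad]
  | cons c r ih => simp [vdBad, ih c]

theorem vd_bad_none (l : List Char) :
    vdBad none l
      = (l.zip l.tail).any (fun pc => PySem.Chars.isupper pc.1 && PySem.Chars.isupper pc.2) := by
  cases l with
  | nil => simp [vdBad]
  | cons c r => simp [vdBad, vd_bad_some r c]

theorem vd_fold_palabra (l : List Char) (t n p : Bool) (a : Option Char) (e cd : Bool) :
    (l.foldl vdStep (t, n, p, a, e, cd)).2.2.1 = (p || vdSegA e cd l) := by
  induction l generalizing t n p a e cd with
  | nil => simp [vdSegA]
  | cons c r ih =>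
    simp only [List.foldl_cons, vdStep, vdSegA]
    by_cases hd : PySem.Chars.isdigit c = true
    · simp [hd, ih]
    · simp only [Bool.not_eq_true] at hd
      by_cases ha : PySem.Chars.isalpha c = true
      · simp [hd, ha, ih]
      · simp only [Bool.not_eq_true] at ha
        by_cases hs : PySem.Chars.isIn [c] [' ', '-', '/', '#', '.'] = true
        · by_cases hec : (e && cd) = true
          · simp [hd, ha, hs, hec, ih]
          · simp only [Bool.not_eq_true] at hec
            simp [hd, ha, hs, hec, ih]
        · simp only [Bool.not_eq_true] at hs
          simp [hd, ha, hs, ih]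

theorem vd_segA_eq_seg (l : List Char) (e cd : Bool) (h : cd = true → e = true) :
    vdSegA e cd l = vdSeg cd l := by
  induction l generalizing e cd with
  | nil => simp [vdSegA, vdSeg]
  | cons c r ih =>
    simp only [vdSegA, vdSeg]
    by_cases hd : PySem.Chars.isdigit c = true
    · simp [hd, vd_digit_not_sep c hd, ih true true (fun _ => rfl)]
    · simp only [Bool.not_eq_true] at hd
      by_cases ha : PySem.Chars.isalpha c = true
      · simp [hd, ha, vd_alpha_not_sep c ha, ih true cd (fun _ => rfl)]
      · simp only [Bool.not_eq_true] at ha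
        by_cases hs : PySem.Chars.isIn [c] [' ', '-', '/', '#', '.'] = true
        · have hec : (e && cd) = cd := by
            cases hcd : cd with
            | false => simp
            | true => simp [h hcd]
          simp [hd, ha, hs, hec, ih false false (by simp)]
        · simp only [Bool.not_eq_true] at hs
          simp [hd, ha, hs, ih e cd h]

theorem vd_words_fold (l : List Char) (ws : List (List Char)) (cur : List Char) :
    ((l.foldl (fun (st : List (List Char) × List Char) c =>
        if PySem.Chars.isIn [c] [' ', '-', '/', '#', '.'] then (st.1 ++ [st.2], [])
        else (st.1, st.2 ++ [c])) (ws, cur)).1).any (fun w => w.any PySem.Chars.isdigit)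
      = (ws.any (fun w => w.any PySem.Chars.isdigit) || vdSeg (cur.any PySem.Chars.isdigit) l) := by
  induction l generalizing ws cur with
  | nil => simp [vdSeg]
  | cons c r ih =>
    simp only [List.foldl_cons, vdSeg]
    by_cases hs : PySem.Chars.isIn [c] [' ', '-', '/', '#', '.'] = true
    · simp only [hs, if_true]
      rw [ih]
      simp [Bool.or_assoc]
    · simp only [Bool.not_eq_true] at hs
      simp only [hs, Bool.false_eq_true, if_false]
      rw [ih]
      simp

-- ===== VERDICT (by name: the statement is the Claim_ definition above) =====
theorem validar_direccion_spec : Claim_equal_validar_direccion := by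
  intro direccion tipo_de_control _
  unfold Spec_validar_direccion validar_direccion validar_direccion_alt
  by_cases ht : tipo_de_control == "Hard Control"
  · simp only [ht, if_true]
    rw [vd_fold_fst, vd_fold_nomay, vd_fold_palabra, vd_bad_none,
        vd_segA_eq_seg _ false false (by simp)]
    have hw := vd_words_fold direccion.toList [] []
    simp only [List.any_nil, Bool.false_or] at hw
    rw [hw]
    cases h1 : direccion.toList.any PySem.Chars.isalpha <;>
    cases h2 : (direccion.toList.zip direccion.toList.tail).any
        (fun pc => PySem.Chars.isupper pc.1 && PySem.Chars.isupper pc.2) <;>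
    cases h3 : vdSeg false direccion.toList <;> simp
  · simp [ht]
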